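-- pv_equiv track=rewrite | github.com/KKR9750/GenProjects | ai-chat-interface/dynamic_agent_matcher.py | _get_role_category
-- ===== SOURCE A (Python) =====
-- def _get_role_category(agent_name: str) -> str:
--     """에이전트 역할 카테고리 분류"""
--     categories = {
--         'analysis': ['requirements_analyst', 'technology_researcher'],
--         'architecture': ['solution_architect'],
--         'development': ['implementation_engineer', 'frontend_developer', 'backend_developer'],
--         'data': ['data_scientist', 'data_engineer', 'database_specialist'],
--         'content': ['content_strategist', 'content_creator', 'seo_specialist'],
--         'automation': ['automation_specialist', 'web_scraper', 'integration_specialist'],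
--         'document': ['document_parser', 'information_extractor', 'data_validator'],
--         'quality': ['quality_assurance'],
--         'design': ['ui_ux_designer', 'visualization_specialist']
--     }
--
--     for category, agents in categories.items():
--         if agent_name in agents:
--             return category
--
--     return 'general'
-- ===== SOURCE B (Python) =====
-- ROLE_BY_AGENT = {
--     'requirements_analyst': 'analysis',
--     'technology_researcher': 'analysis',
--     'solution_architect': 'architecture',
--     'implementation_engineer': 'development',
--     'frontend_developer': 'development',
--     'backend_developer': 'development',
--     'data_scientist': 'data',
--     'data_engineer': 'data',
--     'database_specialist': 'data',
--     'content_strategist': 'content',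
--     'content_creator': 'content',
--     'seo_specialist': 'content',
--     'automation_specialist': 'automation',
--     'web_scraper': 'automation',
--     'integration_specialist': 'automation',
--     'document_parser': 'document',
--     'information_extractor': 'document',
--     'data_validator': 'document',
--     'quality_assurance': 'quality',
--     'ui_ux_designer': 'design',
--     'visualization_specialist': 'design',
-- }
--
-- def _get_role_category(agent_name: str) -> str:
--     return ROLE_BY_AGENT.get(agent_name, 'general')
-- ===== Notes on version B (the rewrite author's own statement) =====
-- stated objective: idiomatic
-- what changed: Replaces the loop over category->list-of-agents with a flat inverted dictionary built once, so classification is a single dict lookup with the same fallback default.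
import Mathlib
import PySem

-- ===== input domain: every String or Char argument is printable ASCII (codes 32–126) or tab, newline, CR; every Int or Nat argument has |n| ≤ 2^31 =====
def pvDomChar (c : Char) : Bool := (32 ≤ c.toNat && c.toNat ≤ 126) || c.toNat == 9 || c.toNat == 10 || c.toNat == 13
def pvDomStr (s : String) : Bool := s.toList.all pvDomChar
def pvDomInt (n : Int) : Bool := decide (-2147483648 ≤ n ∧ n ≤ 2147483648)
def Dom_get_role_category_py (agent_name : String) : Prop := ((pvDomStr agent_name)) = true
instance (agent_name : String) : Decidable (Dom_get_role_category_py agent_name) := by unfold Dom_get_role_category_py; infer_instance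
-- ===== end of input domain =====

-- B replaces A's loop over category → agent-list pairs with one flat inverted dictionary and a single lookup (idiomatic; same values).

-- ===== PORT A =====
-- A's dict literal: category → list of agent names, in insertion order.
def pvCategories : List (String × List String) :=
  [ ("analysis", ["requirements_analyst", "technology_researcher"]),
    ("architecture", ["solution_architect"]),
    ("development", ["implementation_engineer", "frontend_developer", "backend_developer"]),
    ("data", ["data_scientist", "data_engineer", "database_specialist"]),
    ("content", ["content_strategist", "content_creator", "seo_specialist"]),
    ("automation", ["automation_specialist", "web_scraper", "integration_specialist"]),
    ("document", ["document_parser", "information_extractor", "data_validator"]),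
    ("quality", ["quality_assurance"]),
    ("design", ["ui_ux_designer", "visualization_specialist"]) ]

-- A's for-loop over categories.items(): first category whose agent list contains the name; else 'general'.
def pvFindCategory : List (String × List String) → String → String
  | [], _ => "general"
  | (c, ags) :: rest, n => if ags.contains n then c else pvFindCategory rest n

def get_role_category_py (agent_name : String) : String :=
  pvFindCategory pvCategories agent_name

-- ===== PORT B =====
-- B's flat module-level dict: agent name → category.
def pvRoleByAgent : List (String × String) :=
  [ ("requirements_analyst", "analysis"),
    ("technology_researcher", "analysis"),
    ("solution_architect", "architecture"),
    ("implementation_engineer", "development"),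
    ("frontend_developer", "development"),
    ("backend_developer", "development"),
    ("data_scientist", "data"),
    ("data_engineer", "data"),
    ("database_specialist", "data"),
    ("content_strategist", "content"),
    ("content_creator", "content"),
    ("seo_specialist", "content"),
    ("automation_specialist", "automation"),
    ("web_scraper", "automation"),
    ("integration_specialist", "automation"),
    ("document_parser", "document"),
    ("information_extractor", "document"),
    ("data_validator", "document"),
    ("quality_assurance", "quality"),
    ("ui_ux_designer", "design"),
    ("visualization_specialist", "design") ]

def get_role_category_py_alt (agent_name : String) : String :=
  PySem.Dict.getD (PySem.Dict.mk pvRoleByAgent) agent_name "general"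

-- ===== PRECONDITION & SPEC =====
def Spec_get_role_category_py (agent_name : String) (out : String) : Prop := out = get_role_category_py_alt agent_name
instance (agent_name : String) (out : String) : Decidable (Spec_get_role_category_py agent_name out) := by unfold Spec_get_role_category_py; infer_instance

-- ===== CLAIM (what is proved, stated in full; the proofs are below) =====
def Claim_equal_get_role_category_py : Prop := ∀ (agent_name : String), Dom_get_role_category_py agent_name → Spec_get_role_category_py agent_name (get_role_category_py agent_name)

-- ===== LEMMAS AND PROOFS =====

-- ===== VERDICT (by name: the statement is the Claim_ definition above) =====
theorem get_role_category_py_spec : Claim_equal_get_role_category_py := by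
  intro n _
  unfold Spec_get_role_category_py get_role_category_py get_role_category_py_alt
  by_cases h1 : n = "requirements_analyst"
  · subst h1; rfl
  by_cases h2 : n = "technology_researcher"
  · subst h2; rfl
  by_cases h3 : n = "solution_architect"
  · subst h3; rfl
  by_cases h4 : n = "implementation_engineer"
  · subst h4; rfl
  by_cases h5 : n = "frontend_developer"
  · subst h5; rfl
  by_cases h6 : n = "backend_developer"
  · subst h6; rfl
  by_cases h7 : n = "data_scientist"
  · subst h7; rfl
  by_cases h8 : n = "data_engineer"
  · subst h8; rfl
  by_cases h9 : n = "database_specialist"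
  · subst h9; rfl
  by_cases h10 : n = "content_strategist"
  · subst h10; rfl
  by_cases h11 : n = "content_creator"
  · subst h11; rfl
  by_cases h12 : n = "seo_specialist"
  · subst h12; rfl
  by_cases h13 : n = "automation_specialist"
  · subst h13; rfl
  by_cases h14 : n = "web_scraper"
  · subst h14; rfl
  by_cases h15 : n = "integration_specialist"
  · subst h15; rfl
  by_cases h16 : n = "document_parser"
  · subst h16; rfl
  by_cases h17 : n = "information_extractor"
  · subst h17; rfl
  by_cases h18 : n = "data_validator"
  · subst h18; rfl
  by_cases h19 : n = "quality_assurance"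
  · subst h19; rfl
  by_cases h20 : n = "ui_ux_designer"
  · subst h20; rfl
  by_cases h21 : n = "visualization_specialist"
  · subst h21; rfl
  simp [pvCategories, pvRoleByAgent, pvFindCategory, PySem.Dict.getD, PySem.Dict.get?, h1, h2, h3, h4, h5, h6, h7, h8, h9, h10, h11, h12, h13, h14, h15, h16, h17, h18, h19, h20, h21, Ne.symm h1, Ne.symm h2, Ne.symm h3, Ne.symm h4, Ne.symm h5, Ne.symm h6, Ne.symm h7, Ne.symm h8, Ne.symm h9, Ne.symm h10, Ne.symm h11, Ne.symm h12, Ne.symm h13, Ne.symm h14, Ne.symm h15, Ne.symm h16, Ne.symm h17, Ne.symm h18, Ne.symm h19, Ne.symm h20, Ne.symm h21]
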